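-- pv_equiv track=rewrite | github.com/LuUuFe/PYTHON_USP | Parte 1/Lista de Exercicios/soma_hipotenusas.py | soma_hipotenusas
-- ===== SOURCE A (Python) =====
-- def soma_hipotenusas(n):
--     h = 1
--     i = 1
--     j = 1
--     soma = 0
--     valor = 0
--     while h <= n:
--         while i <= n:
--             while j <= n:
--                 if i**2 + j**2 == h**2 and h != valor:
--                     valor = h
--                     soma = soma + h
--                 j += 1
--             i += 1
--             j = 1
--         h += 1
--         i = 1
--         j = 1
--     return soma
-- ===== SOURCE B (Python) =====
-- def soma_hipotenusas(n):
--     sums = {i * i + j * j for i in range(1, n + 1) for j in range(1, n + 1)}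
--     return sum(h for h in range(1, n + 1) if h * h in sums)
-- ===== Notes on version B (the rewrite author's own statement) =====
-- stated objective: faster
-- what changed: Replaces A's three nested while loops with dedup flag by one precomputed set of all leg-square sums i*i+j*j plus a single pass over h testing h*h membership.
import Mathlib
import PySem

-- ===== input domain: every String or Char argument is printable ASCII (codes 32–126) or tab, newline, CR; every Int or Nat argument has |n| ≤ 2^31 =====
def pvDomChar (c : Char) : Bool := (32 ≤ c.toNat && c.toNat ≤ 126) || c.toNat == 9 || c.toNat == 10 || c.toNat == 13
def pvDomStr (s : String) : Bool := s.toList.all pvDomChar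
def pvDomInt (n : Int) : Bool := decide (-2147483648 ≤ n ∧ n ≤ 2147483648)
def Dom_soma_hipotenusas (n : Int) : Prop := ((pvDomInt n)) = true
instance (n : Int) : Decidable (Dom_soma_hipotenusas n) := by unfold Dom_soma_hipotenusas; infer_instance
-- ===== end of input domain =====

-- B replaces A's three nested while-loops (with a `valor` dedup flag) by a precomputed
-- set of all leg-square sums and a single pass over h; objective: faster (asymptotic).

-- ===== PORT A =====
-- (the Nat fuel only makes the while-loops total; each loop runs at most n.toNat times)
-- innermost 'while j <= n' loop; state (soma, valor); i**2 is ported as i * i (exact for ints)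
def somaLoopJ : Nat → Int → Int → Int → Int → Int → Int → Int × Int
  | 0, _, _, _, _, soma, valor => (soma, valor)
  | fuel + 1, n, h, i, j, soma, valor =>
    if j ≤ n then
      if i * i + j * j = h * h ∧ h ≠ valor then
        somaLoopJ fuel n h i (j + 1) (soma + h) h
      else
        somaLoopJ fuel n h i (j + 1) soma valor
    else (soma, valor)

-- middle 'while i <= n' loop (j is reset to 1 before each inner loop, as in A)
def somaLoopI : Nat → Int → Int → Int → Int → Int → Int × Int
  | 0, _, _, _, soma, valor => (soma, valor)
  | fuel + 1, n, h, i, soma, valor =>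
    if i ≤ n then
      let sv := somaLoopJ n.toNat n h i 1 soma valor
      somaLoopI fuel n h (i + 1) sv.1 sv.2
    else (soma, valor)

-- outer 'while h <= n' loop (i and j reset to 1 each iteration, as in A)
def somaLoopH : Nat → Int → Int → Int → Int → Int
  | 0, _, _, soma, _ => soma
  | fuel + 1, n, h, soma, valor =>
    if h ≤ n then
      let sv := somaLoopI n.toNat n h 1 soma valor
      somaLoopH fuel n (h + 1) sv.1 sv.2
    else soma

def soma_hipotenusas (n : Int) : Int := somaLoopH n.toNat n 1 0 0

-- ===== PORT B =====
-- the iteration order of B's set comprehension {i*i+j*j for i … for j …}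
def legSums (n : Int) : List Int :=
  (PySem.List.pyRange 1 (n + 1) 1).flatMap
    (fun i => (PySem.List.pyRange 1 (n + 1) 1).map (fun j => i * i + j * j))

def soma_hipotenusas_alt (n : Int) : Int :=
  let sums : PySem.Set Int := PySem.Set.ofList (legSums n)
  (PySem.List.pyRange 1 (n + 1) 1).foldl
    (fun acc h => if PySem.Set.contains sums (h * h) then acc + h else acc) 0

-- ===== PRECONDITION & SPEC =====
def Spec_soma_hipotenusas (n : Int) (out : Int) : Prop := out = soma_hipotenusas_alt n
instance (n : Int) (out : Int) : Decidable (Spec_soma_hipotenusas n out) := by unfold Spec_soma_hipotenusas; infer_instance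

-- ===== CLAIM (what is proved, stated in full; the proofs are below) =====
def Claim_equal_soma_hipotenusas : Prop := ∀ (n : Int), Dom_soma_hipotenusas n → Spec_soma_hipotenusas n (soma_hipotenusas n)

-- ===== LEMMAS AND PROOFS =====

-- once valor = h, the inner loop can never add again
theorem somaLoopJ_noop (fuel : Nat) (n h i j soma : Int) :
    somaLoopJ fuel n h i j soma h = (soma, h) := by
  induction fuel generalizing j with
  | zero => rfl
  | succ fuel ih =>
    simp only [somaLoopJ]
    split
    · rw [if_neg (by simp), ih]
    · rfl

theorem somaLoopJ_found (fuel : Nat) (n h i j soma valor : Int) (hne : h ≠ valor)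
    (hf : n + 1 - j ≤ (fuel : Int))
    (hex : ∃ j', j ≤ j' ∧ j' ≤ n ∧ i * i + j' * j' = h * h) :
    somaLoopJ fuel n h i j soma valor = (soma + h, h) := by
  obtain ⟨j', hj1, hj2, hj3⟩ := hex
  induction fuel generalizing j with
  | zero => omega
  | succ fuel ih =>
    simp only [somaLoopJ]
    rw [if_pos (by omega)]
    by_cases hc : i * i + j * j = h * h
    · rw [if_pos ⟨hc, hne⟩, somaLoopJ_noop]
    · rw [if_neg (by tauto)]
      exact ih (j + 1) (by omega)
        (by rcases eq_or_lt_of_le hj1 with h' | h' <;> [exact absurd (h' ▸ hj3) hc; omega])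

theorem somaLoopJ_notfound (fuel : Nat) (n h i j soma valor : Int)
    (hno : ∀ j', j ≤ j' → j' ≤ n → i * i + j' * j' ≠ h * h) :
    somaLoopJ fuel n h i j soma valor = (soma, valor) := by
  induction fuel generalizing j with
  | zero => rfl
  | succ fuel ih =>
    simp only [somaLoopJ]
    split
    · rw [if_neg (fun hc => hno j le_rfl (by omega) hc.1), ih]
      exact fun j' a b => hno j' (by omega) b
    · rfl

theorem somaLoopI_noop (fuel : Nat) (n h i soma : Int) :
    somaLoopI fuel n h i soma h = (soma, h) := by
  induction fuel generalizing i with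
  | zero => rfl
  | succ fuel ih =>
    simp only [somaLoopI]
    split
    · rw [somaLoopJ_noop, ih]
    · rfl

theorem somaLoopI_found (fuel : Nat) (n h i soma valor : Int) (hne : h ≠ valor)
    (hf : n + 1 - i ≤ (fuel : Int))
    (hex : ∃ i' j', i ≤ i' ∧ i' ≤ n ∧ 1 ≤ j' ∧ j' ≤ n ∧ i' * i' + j' * j' = h * h) :
    somaLoopI fuel n h i soma valor = (soma + h, h) := by
  obtain ⟨i', j', hi1, hi2, hj1, hj2, heq⟩ := hex
  induction fuel generalizing i with
  | zero => omega
  | succ fuel ih =>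
    simp only [somaLoopI]
    rw [if_pos (by omega)]
    by_cases hc : ∃ j'', 1 ≤ j'' ∧ j'' ≤ n ∧ i * i + j'' * j'' = h * h
    · rw [somaLoopJ_found n.toNat n h i 1 soma valor hne (by omega) hc, somaLoopI_noop]
    · rw [somaLoopJ_notfound n.toNat n h i 1 soma valor
        (fun j'' a b hcontra => hc ⟨j'', a, b, hcontra⟩)]
      refine ih (i + 1) (by omega) ?_
      rcases eq_or_lt_of_le hi1 with h' | h'
      · exact absurd ⟨j', hj1, hj2, h' ▸ heq⟩ hc
      · omega

theorem somaLoopI_notfound (fuel : Nat) (n h i soma valor : Int)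
    (hno : ∀ i' j', i ≤ i' → i' ≤ n → 1 ≤ j' → j' ≤ n → i' * i' + j' * j' ≠ h * h) :
    somaLoopI fuel n h i soma valor = (soma, valor) := by
  induction fuel generalizing i with
  | zero => rfl
  | succ fuel ih =>
    simp only [somaLoopI]
    split
    · rw [somaLoopJ_notfound n.toNat n h i 1 soma valor
        (fun j' a b => hno i j' le_rfl (by omega) a b), ih]
      exact fun i' j' a b c d => hno i' j' (by omega) b c d
    · rfl

-- h*h is a member of B's list of leg-square sums iff legs exist (1 ≤ i,j ≤ n)
theorem mem_legSums_iff (n x : Int) :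
    x ∈ legSums n ↔ ∃ i j, 1 ≤ i ∧ i ≤ n ∧ 1 ≤ j ∧ j ≤ n ∧ i * i + j * j = x := by
  simp only [legSums, List.mem_flatMap, List.mem_map, PySem.List.mem_pyRange_one]
  constructor
  · rintro ⟨i, ⟨hi1, hi2⟩, j, ⟨hj1, hj2⟩, heq⟩
    exact ⟨i, j, hi1, by omega, hj1, by omega, heq⟩
  · rintro ⟨i, j, hi1, hi2, hj1, hj2, heq⟩
    exact ⟨i, ⟨hi1, by omega⟩, j, ⟨hj1, by omega⟩, heq⟩

-- the outer loop of A computes B's fold, from any h with valor < h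
theorem somaLoopH_char (fuel : Nat) (n h soma valor : Int)
    (hf : n + 1 - h ≤ (fuel : Int)) (hv : valor < h) :
    somaLoopH fuel n h soma valor =
      (PySem.List.pyRange h (n + 1) 1).foldl
        (fun acc x => if PySem.Set.contains (PySem.Set.ofList (legSums n)) (x * x) then acc + x
          else acc) soma := by
  induction fuel generalizing h soma valor with
  | zero => rw [PySem.List.pyRange_one_eq_nil (by omega)]; rfl
  | succ fuel ih =>
    simp only [somaLoopH]
    split
    · rw [PySem.List.pyRange_one_cons (by omega), List.foldl_cons]
      by_cases hc : PySem.Set.contains (PySem.Set.ofList (legSums n)) (h * h) = true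
      · rw [if_pos hc]
        obtain ⟨i, j, hi1, hi2, hj1, hj2, heq⟩ :=
          (mem_legSums_iff n (h * h)).1 ((PySem.Set.mem_ofList _ _).1 ((PySem.Set.contains_iff _ _).1 hc))
        rw [somaLoopI_found n.toNat n h 1 soma valor (by omega) (by omega)
          ⟨i, j, hi1, hi2, hj1, hj2, heq⟩]
        exact ih (h + 1) (soma + h) h (by omega) (by omega)
      · rw [if_neg hc]
        rw [somaLoopI_notfound n.toNat n h 1 soma valor (fun i j a b c d hcontra => hc
          ((PySem.Set.contains_iff _ _).2 ((PySem.Set.mem_ofList _ _).2 ((mem_legSums_iff n (h * h)).2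
            ⟨i, j, by omega, b, c, d, hcontra⟩))))]
        exact ih (h + 1) soma valor (by omega) (by omega)
    · rw [PySem.List.pyRange_one_eq_nil (by omega), List.foldl_nil]

-- ===== VERDICT (by name: the statement is the Claim_ definition above) =====
theorem soma_hipotenusas_spec : Claim_equal_soma_hipotenusas := by
  intro n _
  unfold Spec_soma_hipotenusas soma_hipotenusas soma_hipotenusas_alt
  exact somaLoopH_char n.toNat n 1 0 0 (by omega) (by omega)
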